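-- pv_equiv track=rewrite | github.com/kurniarahmattt/fine-tune-pentagi | src/prepare_dataset.py | process_conversation_flow
-- ===== SOURCE A (Python) =====
-- from typing import List, Dict, Optional
--
-- def process_conversation_flow(log_entries: List[Dict]) -> List[List[Dict]]:
--     """Process a sequence of log entries to reconstruct conversation flow"""
--     conversations = []
--     current_conversation = []
--
--     for entry in log_entries:
--         # Start new conversation on certain event types
--         if entry.get('name') == 'custom-generation-ex':
--             if current_conversation:
--                 conversations.append(current_conversation)
--             current_conversation = [entry]
--         else:
--             if current_conversation:
--                 current_conversation.append(entry)
--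
--     # Add the last conversation
--     if current_conversation:
--         conversations.append(current_conversation)
--
--     return conversations
-- ===== SOURCE B (Python) =====
-- def process_conversation_flow(log_entries):
--     """Process a sequence of log entries to reconstruct conversation flow"""
--     marks = [i for i, e in enumerate(log_entries) if e.get('name') == 'custom-generation-ex']
--     bounds = marks[1:] + [len(log_entries)]
--     return [log_entries[a:b] for a, b in zip(marks, bounds)]
-- ===== Notes on version B (the rewrite author's own statement) =====
-- stated objective: simpler
-- what changed: Replaces the stateful accumulator loop (current conversation flushed into the result on each marker and at the end) by first computing the list of marker indices and then returning the slices of the input between consecutive markers.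
import Mathlib
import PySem

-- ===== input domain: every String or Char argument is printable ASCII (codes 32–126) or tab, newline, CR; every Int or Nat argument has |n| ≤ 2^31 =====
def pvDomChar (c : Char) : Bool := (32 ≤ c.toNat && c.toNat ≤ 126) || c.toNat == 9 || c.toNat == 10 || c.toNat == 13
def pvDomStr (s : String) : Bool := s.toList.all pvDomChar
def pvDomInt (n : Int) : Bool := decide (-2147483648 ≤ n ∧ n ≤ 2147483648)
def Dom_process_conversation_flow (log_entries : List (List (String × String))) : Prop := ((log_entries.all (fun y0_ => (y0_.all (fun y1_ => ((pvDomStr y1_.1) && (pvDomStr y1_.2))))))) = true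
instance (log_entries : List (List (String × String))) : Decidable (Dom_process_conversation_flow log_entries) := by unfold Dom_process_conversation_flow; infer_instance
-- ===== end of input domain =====

-- B replaces A's stateful accumulator loop by computing the marker indices and slicing between
-- consecutive markers (objective: simpler); proved to return the same conversations on every input.


-- entry.get('name') == 'custom-generation-ex'  (shared by both ports: it is the same Python test)
def pvIsMark (e : List (String × String)) : Bool :=
  (PySem.Dict.mk e).get? "name" == some "custom-generation-ex"

-- ===== PORT A =====
def process_conversation_flow (log_entries : List (List (String × String))) : List (List (List (String × String))) :=
  let st := log_entries.foldl
    (fun (st : List (List (List (String × String))) × List (List (String × String))) entry =>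
      if pvIsMark entry then
        ((if st.2.isEmpty then st.1 else st.1 ++ [st.2]), [entry])
      else
        (st.1, if st.2.isEmpty then st.2 else st.2 ++ [entry]))
    ([], [])
  if st.2.isEmpty then st.1 else st.1 ++ [st.2]

-- ===== PORT B =====
def process_conversation_flow_alt (log_entries : List (List (String × String))) : List (List (List (String × String))) :=
  let marks : List Int := ((PySem.List.enumerate log_entries 0).filter (fun p => pvIsMark p.2)).map (·.1)
  let bounds : List Int := marks.tail ++ [(log_entries.length : Int)]
  (marks.zip bounds).map (fun p => PySem.List.slice log_entries (some p.1) (some p.2))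

-- ===== PRECONDITION & SPEC =====
def Spec_process_conversation_flow (log_entries : List (List (String × String))) (out : List (List (List (String × String)))) : Prop := out = process_conversation_flow_alt log_entries
instance (log_entries : List (List (String × String))) (out : List (List (List (String × String)))) : Decidable (Spec_process_conversation_flow log_entries out) := by unfold Spec_process_conversation_flow; infer_instance

-- ===== CLAIM (what is proved, stated in full; the proofs are below) =====
def Claim_equal_process_conversation_flow : Prop := ∀ (log_entries : List (List (String × String))), Dom_process_conversation_flow log_entries → Spec_process_conversation_flow log_entries (process_conversation_flow log_entries)

-- ===== LEMMAS AND PROOFS =====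

-- the "not a marker" predicate
def pvKeep (e : List (String × String)) : Bool := !pvIsMark e

-- reference segmentation both ports are reduced to
def pvSegs (xs : List (List (String × String))) : List (List (List (String × String))) :=
  match xs with
  | [] => []
  | e :: rest =>
    if pvIsMark e then
      (e :: rest.takeWhile pvKeep) :: pvSegs (rest.dropWhile pvKeep)
    else
      pvSegs rest
termination_by xs.length
decreasing_by
  all_goals simp only [List.length_cons]
  · have := List.length_dropWhile_le pvKeep rest
    omega
  · omega

theorem pvSegs_cons_mark (e : List (String × String)) (rest : List (List (String × String)))
    (h : pvIsMark e = true) :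
    pvSegs (e :: rest) = (e :: rest.takeWhile pvKeep) :: pvSegs (rest.dropWhile pvKeep) := by
  rw [pvSegs.eq_def]; simp [h]

theorem pvSegs_cons_nomark (e : List (String × String)) (rest : List (List (String × String)))
    (h : ¬ pvIsMark e = true) :
    pvSegs (e :: rest) = pvSegs rest := by
  rw [pvSegs.eq_def]; simp [h]

theorem pvSegs_nil : pvSegs [] = [] := by
  rw [pvSegs.eq_def]

-- A's loop step
def pvStepA (st : List (List (List (String × String))) × List (List (String × String)))
    (entry : List (String × String)) :
    List (List (List (String × String))) × List (List (String × String)) :=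
  if pvIsMark entry then
    ((if st.2.isEmpty then st.1 else st.1 ++ [st.2]), [entry])
  else
    (st.1, if st.2.isEmpty then st.2 else st.2 ++ [entry])

def pvFinish (st : List (List (List (String × String))) × List (List (String × String))) :
    List (List (List (String × String))) :=
  if st.2.isEmpty then st.1 else st.1 ++ [st.2]

-- marker positions as Nats, structurally
def pvNatMarks (xs : List (List (String × String))) : List Nat :=
  match xs with
  | [] => []
  | e :: rest =>
    if pvIsMark e then 0 :: (pvNatMarks rest).map (· + 1)
    else (pvNatMarks rest).map (· + 1)

-- B's slicing, on Nat indices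
def pvNBuild (xs : List (List (String × String))) (ms : List Nat) : List (List (List (String × String))) :=
  (ms.zip (ms.tail ++ [xs.length])).map (fun p => (xs.drop p.1).take (p.2 - p.1))

theorem pvSegs_dropWhile (xs : List (List (String × String))) :
    pvSegs (xs.dropWhile pvKeep) = pvSegs xs := by
  induction xs with
  | nil => rfl
  | cons e rest ih =>
    by_cases h : pvIsMark e
    · simp [List.dropWhile, pvKeep, h]
    · rw [List.dropWhile_cons_of_pos (by simp [pvKeep, h]), ih,
        pvSegs_cons_nomark e rest h]

theorem pvNatMarks_nil_take (xs : List (List (String × String))) (h : pvNatMarks xs = []) :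
    xs.takeWhile pvKeep = xs ∧ xs.dropWhile pvKeep = [] := by
  induction xs with
  | nil => simp
  | cons e rest ih =>
    by_cases hm : pvIsMark e
    · simp [pvNatMarks, hm] at h
    · simp only [pvNatMarks, hm, if_false, Bool.false_eq_true, List.map_eq_nil_iff] at h
      obtain ⟨h1, h2⟩ := ih h
      simp [List.takeWhile_cons, List.dropWhile_cons, pvKeep, hm, h1, h2]

theorem pvNatMarks_head (xs : List (List (String × String))) (j : Nat) (m : List Nat)
    (h : pvNatMarks xs = j :: m) :
    xs.take j = xs.takeWhile pvKeep ∧ xs.drop j = xs.dropWhile pvKeep := by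
  induction xs generalizing j m with
  | nil => simp [pvNatMarks] at h
  | cons e rest ih =>
    by_cases hm : pvIsMark e
    · simp only [pvNatMarks, hm, if_true, List.cons.injEq] at h
      obtain ⟨hj, -⟩ := h
      subst hj
      simp [List.takeWhile_cons, List.dropWhile_cons, pvKeep, hm]
    · simp only [pvNatMarks, hm, if_false, Bool.false_eq_true] at h
      cases hrest : pvNatMarks rest with
      | nil => rw [hrest] at h; simp at h
      | cons j' m' =>
        rw [hrest] at h
        simp only [List.map_cons, List.cons.injEq] at h
        obtain ⟨hj, -⟩ := h
        subst hj
        obtain ⟨h1, h2⟩ := ih j' m' hrest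
        simp [List.takeWhile_cons, List.dropWhile_cons, pvKeep, hm, h1, h2]

-- shifting all indices by one drops the head
theorem pvNBuild_shift (e : List (String × String)) (xs : List (List (String × String))) (ms : List Nat) :
    pvNBuild (e :: xs) (ms.map (· + 1)) = pvNBuild xs ms := by
  unfold pvNBuild
  induction ms with
  | nil => rfl
  | cons a ms ih =>
    cases ms with
    | nil => simp
    | cons b ms =>
      simp only [List.map_cons, List.tail_cons, List.cons_append, List.zip_cons_cons,
        List.length_cons, List.cons.injEq] at ih ⊢
      refine ⟨by simp [Nat.add_sub_add_right], ?_⟩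
      simpa using ih

theorem pvNBuild_eq_segs (xs : List (List (String × String))) :
    pvNBuild xs (pvNatMarks xs) = pvSegs xs := by
  induction xs with
  | nil => rw [pvSegs_nil]; rfl
  | cons e rest ih =>
    by_cases hm : pvIsMark e
    · rw [pvSegs_cons_mark e rest hm]
      simp only [pvNatMarks, hm, if_true]
      cases hrest : pvNatMarks rest with
      | nil =>
        obtain ⟨h1, h2⟩ := pvNatMarks_nil_take rest hrest
        rw [h1, h2, pvSegs_nil]
        simp [pvNBuild]
      | cons j m =>
        obtain ⟨h1, h2⟩ := pvNatMarks_head rest j m hrest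
        have hshift := pvNBuild_shift e rest (pvNatMarks rest)
        rw [ih, ← pvSegs_dropWhile rest] at hshift
        have hstep : pvNBuild (e :: rest) (0 :: (pvNatMarks rest).map (· + 1))
            = (e :: rest.take j) :: pvNBuild (e :: rest) ((pvNatMarks rest).map (· + 1)) := by
          unfold pvNBuild
          rw [hrest]
          simp [List.take_succ_cons]
        rw [← hrest, hstep, hshift, h1]
    · rw [pvSegs_cons_nomark e rest hm]
      simp only [pvNatMarks, hm, if_false, Bool.false_eq_true]
      rw [pvNBuild_shift, ih]

-- Int marks of B are the Nat marks, shifted by the enumerate start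
def pvCast (k : Nat) : Int := Int.ofNat k

theorem pvMarks_eq (xs : List (List (String × String))) (s : Int) :
    ((PySem.List.enumerate xs s).filter (fun p => pvIsMark p.2)).map (·.1)
      = (pvNatMarks xs).map (fun k => s + pvCast k) := by
  induction xs generalizing s with
  | nil => simp [PySem.List.enumerate_nil, pvNatMarks]
  | cons e rest ih =>
    rw [PySem.List.enumerate_cons]
    by_cases hm : pvIsMark e
    · simp only [List.filter_cons, hm, if_true, List.map_cons, pvNatMarks, ih]
      rw [List.map_map]
      refine List.cons_eq_cons.mpr ⟨by simp [pvCast], ?_⟩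
      apply List.map_congr_left; intro k _; simp [pvCast]; omega
    · simp only [List.filter_cons, hm, Bool.false_eq_true, if_false, pvNatMarks, ih]
      rw [List.map_map]
      apply List.map_congr_left; intro k _; simp [pvCast]; omega

theorem pvAlt_eq_nbuild (xs : List (List (String × String))) :
    process_conversation_flow_alt xs = pvNBuild xs (pvNatMarks xs) := by
  unfold process_conversation_flow_alt pvNBuild
  rw [pvMarks_eq xs 0]
  simp only [zero_add]
  generalize pvNatMarks xs = ms
  cases ms with
  | nil => rfl
  | cons a ms =>
    simp only [List.map_cons, List.tail_cons]
    rw [show (ms.map (fun k => pvCast k)) ++ [(xs.length : Int)]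
        = (ms ++ [xs.length]).map (fun k => pvCast k) by simp [pvCast],
      show (pvCast a :: ms.map (fun k => pvCast k))
        = ((a :: ms).map (fun k => pvCast k)) by simp,
      List.zip_map, List.map_map]
    apply List.map_congr_left
    intro p _
    show PySem.List.slice xs (some (pvCast p.1)) (some (pvCast p.2)) = _
    exact PySem.List.slice_natCast xs p.1 p.2

-- A's loop with an arbitrary starting state
theorem pvFoldA_eq (xs : List (List (String × String)))
    (convs : List (List (List (String × String)))) (cur : List (List (String × String))) :
    pvFinish (xs.foldl pvStepA (convs, cur))
      = convs ++ (if cur.isEmpty then pvSegs xs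
          else (cur ++ xs.takeWhile pvKeep) :: pvSegs (xs.dropWhile pvKeep)) := by
  induction xs generalizing convs cur with
  | nil =>
    by_cases hc : cur.isEmpty
    · simp [pvFinish, hc, pvSegs_nil]
    · simp [pvFinish, hc, pvSegs_nil]
  | cons e rest ih =>
    by_cases hm : pvIsMark e
    · simp only [List.foldl_cons, pvStepA, hm, if_true]
      rw [ih]
      by_cases hc : cur.isEmpty
      · simp only [hc, if_true, List.isEmpty_cons, Bool.false_eq_true, if_false]
        rw [pvSegs_cons_mark e rest hm]
        simp
      · have hc' : cur.isEmpty = false := by simpa using hc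
        simp only [hc', Bool.false_eq_true, if_false, List.isEmpty_cons]
        rw [List.takeWhile_cons, List.dropWhile_cons]
        simp only [pvKeep, hm, Bool.not_true, Bool.false_eq_true, if_false]
        rw [pvSegs_cons_mark e rest hm]
        simp [List.append_assoc]
    · simp only [List.foldl_cons, pvStepA, hm, Bool.false_eq_true, if_false]
      by_cases hc : cur.isEmpty
      · have hc' : cur.isEmpty = true := by simpa using hc
        simp only [hc', if_true]
        rw [ih]
        simp only [hc', if_true]
        rw [pvSegs_cons_nomark e rest hm]
      · have hc' : cur.isEmpty = false := by simpa using hc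
        simp only [hc', Bool.false_eq_true, if_false]
        rw [ih]
        have hne : (cur ++ [e]).isEmpty = false := by simp
        simp only [hc', hne, Bool.false_eq_true, if_false]
        rw [List.takeWhile_cons, List.dropWhile_cons]
        simp [pvKeep, hm, List.append_assoc]

-- ===== VERDICT (by name: the statement is the Claim_ definition above) =====
theorem process_conversation_flow_spec : Claim_equal_process_conversation_flow := by
  intro xs _
  unfold Spec_process_conversation_flow
  rw [pvAlt_eq_nbuild, pvNBuild_eq_segs]
  show pvFinish (xs.foldl pvStepA ([], [])) = pvSegs xs
  rw [pvFoldA_eq]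
  simp
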